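-- pv_equiv track=rewrite | github.com/LuisAguilarDev/advent_of_code_python | src/2018/day8/part2.py | node_value
-- ===== SOURCE A (Python) =====
-- def node_value(numbers: list[int]) -> int:
--     """Recursively computes the value of a node encoded in a flat list.
--
--     - If a node has no children, its value is the sum of its metadata.
--     - If a node has children, each metadata entry is a 1-based index into the
--       children list. The node's value is the sum of the referenced children's values.
--       Out-of-range indices are skipped (contribute 0).
--
--     Args:
--         numbers: Flat list of integers representing the serialized tree. Modified in place.
--
--     Returns:
--         The computed value of this node.
--     """
--     q_children = numbers.pop(0)
--     q_metadata = numbers.pop(0)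
--
--     if q_children == 0:
--         total = 0
--         for _ in range(q_metadata):
--             total += numbers.pop(0)
--         return total
--
--     children_values: list[int] = []
--     for _ in range(q_children):
--         children_values.append(node_value(numbers))
--
--     total = 0
--     for _ in range(q_metadata):
--         index: int = numbers.pop(0)
--         if 1 <= index <= q_children:
--             total += children_values[index - 1]
--
--     return total
-- ===== SOURCE B (Python) =====
-- def node_value(numbers: list[int]) -> int:
--     """Iterative stack-based DFS over the serialized tree; consumes `numbers`
--     front-to-back exactly like the recursive version (modifies it in place)."""
--     # frame: [children_remaining, q_children, q_metadata, child_values]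
--     stack = []
--     while True:
--         q_children = numbers.pop(0)
--         q_metadata = numbers.pop(0)
--         stack.append([max(q_children, 0), q_children, q_metadata, []])
--         while stack[-1][0] == 0:
--             _, qc, qm, vals = stack.pop()
--             total = 0
--             for _ in range(qm):
--                 x = numbers.pop(0)
--                 if qc == 0:
--                     total += x
--                 elif 1 <= x <= qc:
--                     total += vals[x - 1]
--             if not stack:
--                 return total
--             stack[-1][0] -= 1
--             stack[-1][3].append(total)
-- ===== Notes on version B (the rewrite author's own statement) =====
-- stated objective: alternative
-- what changed: The recursive descent over the serialized tree is replaced by an iterative DFS driven by an explicit stack of frames (children-remaining, q_children, q_metadata, resolved child values), with the leaf and indexed-metadata cases unified into one metadata-reading loop; numbers are consumed in the identical front-to-back order.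
import Mathlib
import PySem

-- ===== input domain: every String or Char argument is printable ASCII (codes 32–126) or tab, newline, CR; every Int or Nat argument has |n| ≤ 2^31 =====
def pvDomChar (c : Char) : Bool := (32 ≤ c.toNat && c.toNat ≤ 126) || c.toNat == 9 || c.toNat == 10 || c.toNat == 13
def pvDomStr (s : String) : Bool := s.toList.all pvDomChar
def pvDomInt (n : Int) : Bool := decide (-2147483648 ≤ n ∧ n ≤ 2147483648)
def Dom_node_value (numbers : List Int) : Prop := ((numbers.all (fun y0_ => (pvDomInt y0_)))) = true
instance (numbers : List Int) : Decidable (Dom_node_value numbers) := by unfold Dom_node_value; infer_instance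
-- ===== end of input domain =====

-- B replaces A's recursion by an explicit stack-based DFS (alternative decomposition, same cost).
-- A and B both consume `numbers` front-to-back via pop(0) in the identical order (same in-place
-- mutation); the equivalence proved here is about the return value.

-- ===== PORT A =====
-- leaf loop: 'for _ in range(q_metadata): total += numbers.pop(0)'; none = IndexError
def sumMetaA : Int → Nat → List Int → Option (Int × List Int)
  | acc, 0, ns => some (acc, ns)
  | acc, k+1, x :: r => sumMetaA (acc + x) k r
  | _, _+1, [] => none

-- metadata loop of an inner node: pop an index, guard 1 <= index <= q_children,
-- children_values[index-1] via pyGet? (in range whenever the guard fires)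
def metaIdxA (qc : Int) (vals : List Int) : Int → Nat → List Int → Option (Int × List Int)
  | acc, 0, ns => some (acc, ns)
  | acc, k+1, x :: r =>
      if 1 ≤ x ∧ x ≤ qc then
        match PySem.List.pyGet? vals (x - 1) with
        | some w => metaIdxA qc vals (acc + w) k r
        | none => none
      else metaIdxA qc vals acc k r
  | _, _+1, [] => none

-- A's recursion, state-passing: value of one node plus the remaining list; fuel bounds the
-- recursion depth (numbers.length + 1 always suffices); none = IndexError
mutual
def aRun : Nat → List Int → Option (Int × List Int)
  | 0, _ => none
  | _+1, [] => none
  | _+1, [_] => none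
  | f+1, c :: m :: rest =>
      if c = 0 then sumMetaA 0 m.toNat rest
      else
        match aChildren f c.toNat rest with
        | some (vals, rest') => metaIdxA c vals 0 m.toNat rest'
        | none => none
termination_by f _ => (f, 0, 0)

-- 'for _ in range(q_children): children_values.append(node_value(numbers))'
def aChildren : Nat → Nat → List Int → Option (List Int × List Int)
  | _, 0, ns => some ([], ns)
  | f, k+1, ns =>
      match aRun f ns with
      | some (v, rest) =>
        match aChildren f k rest with
        | some (vals, rest') => some (v :: vals, rest')
        | none => none
      | none => none
termination_by f k _ => (f, 1, k)
end

def node_value (numbers : List Int) : Int :=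
  match aRun (numbers.length + 1) numbers with
  | some (v, _) => v
  | none => 0  -- Python raises here; excluded by Pre_node_value

-- ===== PORT B =====
-- B's unified metadata loop: leaf case (qc == 0) adds the entry itself, otherwise the
-- 1 <= x <= qc guard indexes the resolved child values
def readMetaB (qc : Int) (vals : List Int) : Int → Nat → List Int → Option (Int × List Int)
  | acc, 0, ns => some (acc, ns)
  | acc, k+1, x :: r =>
      if qc = 0 then readMetaB qc vals (acc + x) k r
      else if 1 ≤ x ∧ x ≤ qc then
        match PySem.List.pyGet? vals (x - 1) with
        | some w => readMetaB qc vals (acc + w) k r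
        | none => none
      else readMetaB qc vals acc k r
  | _, _+1, [] => none

-- a frame: (children remaining, q_children, q_metadata, resolved child values)
mutual
-- outer 'while True': pop a header, push a frame
def bOuter : Nat → List (Nat × Int × Int × List Int) → List Int → Option Int
  | 0, _, _ => none
  | _+1, _, [] => none
  | _+1, _, [_] => none
  | f+1, stack, c :: m :: rest => bInner f ((c.toNat, c, m, ([] : List Int)) :: stack) rest
termination_by f _ _ => (f, 0, 0)

-- inner 'while stack[-1][0] == 0': finish completed frames, feed values to the parent
def bInner : Nat → List (Nat × Int × Int × List Int) → List Int → Option Int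
  | f, (rem, qc, qm, vals) :: s, ns =>
      if rem = 0 then
        match readMetaB qc vals 0 qm.toNat ns with
        | some (total, rest) =>
          match s with
          | [] => some total
          | (r2, qc2, qm2, v2) :: s2 => bInner f ((r2 - 1, qc2, qm2, v2 ++ [total]) :: s2) rest
        | none => none
      else bOuter f ((rem, qc, qm, vals) :: s) ns
  | _, [], _ => none
termination_by f s _ => (f, 1, s.length)
end

def node_value_alt (numbers : List Int) : Int :=
  (bOuter (numbers.length + 1) [] numbers).getD 0  -- Python raises on none; excluded by Pre_node_value

-- ===== PRECONDITION & SPEC =====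
-- shape checker: Pre_ holds exactly when one node parses from the front of the list,
-- i.e. exactly when the Python A returns instead of raising IndexError
def dropMeta : Nat → List Int → Option (List Int)
  | 0, ns => some ns
  | k+1, _ :: r => dropMeta k r
  | _+1, [] => none

mutual
def shapeN : Nat → List Int → Option (List Int)
  | 0, _ => none
  | _+1, [] => none
  | _+1, [_] => none
  | f+1, c :: m :: rest =>
      match shapeC f c.toNat rest with
      | some rest' => dropMeta m.toNat rest'
      | none => none

def shapeC : Nat → Nat → List Int → Option (List Int)
  | _, 0, ns => some ns
  | 0, _+1, _ => none
  | f+1, k+1, ns =>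
      match shapeN f ns with
      | some rest => shapeC f k rest
      | none => none
end

-- Pre_ excludes exactly the inputs on which A raises IndexError: it holds iff the flat list
-- starts with a complete serialized node. Well-formedness of this recursive wire format has no
-- non-recursive characterisation, so Pre_ is stated as a grammar check (shapeN) that reads only
-- counts/lengths and never computes any node value; fuel 2*len+2 always suffices for a
-- well-formed prefix.
def Pre_node_value (numbers : List Int) : Prop :=
  (shapeN (2 * numbers.length + 2) numbers).isSome = true
instance (numbers : List Int) : Decidable (Pre_node_value numbers) := by
  unfold Pre_node_value; infer_instance

def pvWitness_node_value : List Int := [1, 1, 0, 1, 99, 1]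

def Spec_node_value (numbers : List Int) (out : Int) : Prop := out = node_value_alt numbers
instance (numbers : List Int) (out : Int) : Decidable (Spec_node_value numbers out) := by
  unfold Spec_node_value; infer_instance

-- ===== CLAIM (what is proved, stated in full; the proofs are below) =====
def Claim_equal_node_value : Prop :=
  ∀ (numbers : List Int), Dom_node_value numbers → Pre_node_value numbers →
    Spec_node_value numbers (node_value numbers)

-- ===== LEMMAS AND PROOFS =====

-- B's unified metadata loop coincides with A's leaf loop when qc = 0 …
lemma readMetaB_zero (vals : List Int) :
    ∀ (k : Nat) (acc : Int) (ns : List Int), readMetaB 0 vals acc k ns = sumMetaA acc k ns := by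
  intro k
  induction k with
  | zero => intro acc ns; simp [readMetaB, sumMetaA]
  | succ k ih =>
    intro acc ns
    cases ns with
    | nil => simp [readMetaB, sumMetaA]
    | cons x r => simp [readMetaB, sumMetaA, ih]

-- … and with A's indexed loop when qc ≠ 0
lemma readMetaB_ne (qc : Int) (hqc : qc ≠ 0) (vals : List Int) :
    ∀ (k : Nat) (acc : Int) (ns : List Int),
      readMetaB qc vals acc k ns = metaIdxA qc vals acc k ns := by
  intro k
  induction k with
  | zero => intro acc ns; simp [readMetaB, metaIdxA]
  | succ k ih =>
    intro acc ns
    cases ns with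
    | nil => simp [readMetaB, metaIdxA]
    | cons x r =>
      simp only [readMetaB, metaIdxA, if_neg hqc]
      split
      · cases h : PySem.List.pyGet? vals (x - 1) <;> simp [ih]
      · exact ih acc r

lemma sumMetaA_len :
    ∀ (k : Nat) (acc v : Int) (ns rest : List Int),
      sumMetaA acc k ns = some (v, rest) → rest.length ≤ ns.length := by
  intro k
  induction k with
  | zero => intro acc v ns rest h; simp [sumMetaA] at h; simp [h.2]
  | succ k ih =>
    intro acc v ns rest h
    cases ns with
    | nil => simp [sumMetaA] at h
    | cons x r => simp only [sumMetaA] at h; have := ih _ _ _ _ h; simp; omega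

lemma metaIdxA_len (qc : Int) (vals : List Int) :
    ∀ (k : Nat) (acc v : Int) (ns rest : List Int),
      metaIdxA qc vals acc k ns = some (v, rest) → rest.length ≤ ns.length := by
  intro k
  induction k with
  | zero => intro acc v ns rest h; simp [metaIdxA] at h; simp [h.2]
  | succ k ih =>
    intro acc v ns rest h
    cases ns with
    | nil => simp [metaIdxA] at h
    | cons x r =>
      simp only [metaIdxA] at h
      split at h
      · cases hg : PySem.List.pyGet? vals (x - 1) with
        | none => rw [hg] at h; simp at h
        | some w => rw [hg] at h; simp at h; have := ih _ _ _ _ h; simp; omega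
      · have := ih _ _ _ _ h; simp; omega

lemma dropMeta_len :
    ∀ (k : Nat) (ns rest : List Int), dropMeta k ns = some rest → rest.length + k = ns.length := by
  intro k
  induction k with
  | zero => intro ns rest h; simp [dropMeta] at h; simp [h]
  | succ k ih =>
    intro ns rest h
    cases ns with
    | nil => simp [dropMeta] at h
    | cons x r => simp only [dropMeta] at h; have := ih _ _ h; simp; omega

lemma sumMetaA_of_dropMeta :
    ∀ (k : Nat) (ns rest : List Int), dropMeta k ns = some rest →
      ∀ acc, ∃ v, sumMetaA acc k ns = some (v, rest) := by
  intro k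
  induction k with
  | zero => intro ns rest h acc; simp [dropMeta] at h; exact ⟨acc, by simp [sumMetaA, h]⟩
  | succ k ih =>
    intro ns rest h acc
    cases ns with
    | nil => simp [dropMeta] at h
    | cons x r =>
      simp only [dropMeta] at h
      obtain ⟨v, hv⟩ := ih _ _ h (acc + x)
      exact ⟨v, by simp [sumMetaA, hv]⟩

lemma metaIdxA_of_dropMeta (qc : Int) (vals : List Int) (hlen : qc.toNat ≤ vals.length) :
    ∀ (k : Nat) (ns rest : List Int), dropMeta k ns = some rest →
      ∀ acc, ∃ v, metaIdxA qc vals acc k ns = some (v, rest) := by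
  intro k
  induction k with
  | zero => intro ns rest h acc; simp [dropMeta] at h; exact ⟨acc, by simp [metaIdxA, h]⟩
  | succ k ih =>
    intro ns rest h acc
    cases ns with
    | nil => simp [dropMeta] at h
    | cons x r =>
      simp only [dropMeta] at h
      by_cases hg : 1 ≤ x ∧ x ≤ qc
      · have hi0 : (0:Int) ≤ x - 1 := by omega
        have hi1 : x - 1 < (vals.length : Int) := by omega
        have hsome := PySem.List.pyGet?_eq_some_getElem vals hi0 hi1
        obtain ⟨v, hv⟩ := ih _ _ h (acc + vals[(x-1).toNat])
        refine ⟨v, ?_⟩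
        simp only [metaIdxA, if_pos hg, hsome]
        exact hv
      · obtain ⟨v, hv⟩ := ih _ _ h acc
        exact ⟨v, by simp [metaIdxA, if_neg hg, hv]⟩

-- the continuation of B's machine after one node's value v has been computed:
-- return it (empty stack) or hand it to the parent frame
def resume : Nat → List (Nat × Int × Int × List Int) → Int → List Int → Option Int
  | _, [], v, _ => some v
  | f, (r2, qc2, qm2, v2) :: s2, v, rest => bInner f ((r2 - 1, qc2, qm2, v2 ++ [v]) :: s2) rest

-- shape success implies A returns (with the expected remainder and child count);
-- the shape checker burns fuel at every call, A's recursion only per depth, so any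
-- aRun fuel above the list length works
lemma shape_aRun :
    ∀ f : Nat,
      (∀ ns rest, shapeN f ns = some rest →
        rest.length + 2 ≤ ns.length ∧
        ∀ g, ns.length + 1 ≤ g → ∃ v, aRun g ns = some (v, rest)) ∧
      (∀ (k : Nat) (ns rest : List Int), shapeC f k ns = some rest →
        rest.length ≤ ns.length ∧
        ∀ g, ns.length + 1 ≤ g → ∃ vals, aChildren g k ns = some (vals, rest) ∧ vals.length = k) := by
  intro f
  induction f with
  | zero =>
    constructor
    · intro ns rest h; simp [shapeN] at h
    · intro k ns rest h
      cases k with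
      | zero =>
        simp [shapeC] at h
        exact ⟨by simp [h], fun g hg => ⟨[], by simp [aChildren, h]⟩⟩
      | succ k => simp [shapeC] at h
  | succ f ih =>
    constructor
    · intro ns rest h
      match ns with
      | [] => simp [shapeN] at h
      | [_] => simp [shapeN] at h
      | c :: m :: rest0 =>
        simp only [shapeN] at h
        cases hc : shapeC f c.toNat rest0 with
        | none => rw [hc] at h; simp at h
        | some rest1 =>
          rw [hc] at h; simp at h
          obtain ⟨hl1, Hc⟩ := ih.2 _ _ _ hc
          have hdl := dropMeta_len _ _ _ h
          refine ⟨by simp; omega, ?_⟩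
          intro g hg
          simp only [List.length_cons] at hg
          obtain ⟨g', rfl⟩ : ∃ g', g = g' + 1 := ⟨g - 1, by omega⟩
          by_cases hc0 : c = 0
          · subst hc0
            have heq : rest1 = rest0 := by simpa [shapeC] using hc.symm
            subst heq
            obtain ⟨v, hv⟩ := sumMetaA_of_dropMeta _ _ _ h 0
            exact ⟨v, by simp [aRun, hv]⟩
          · obtain ⟨vals, hch, hvl⟩ := Hc g' (by omega)
            have hql : c.toNat ≤ vals.length := by omega
            obtain ⟨v, hv⟩ := metaIdxA_of_dropMeta c vals hql _ _ _ h 0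
            exact ⟨v, by simp [aRun, hc0, hch, hv]⟩
    · intro k
      induction k with
      | zero =>
        intro ns rest h
        simp [shapeC] at h
        exact ⟨by simp [h], fun g hg => ⟨[], by simp [aChildren, h]⟩⟩
      | succ k ihk =>
        intro ns rest h
        simp only [shapeC] at h
        cases hn : shapeN f ns with
        | none => rw [hn] at h; simp at h
        | some r1 =>
          rw [hn] at h; simp at h
          obtain ⟨hl, Hn⟩ := ih.1 _ _ hn
          obtain ⟨hl2, Hc⟩ := ih.2 _ _ _ h
          refine ⟨by omega, ?_⟩
          intro g hg
          obtain ⟨v, hv⟩ := Hn g hg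
          obtain ⟨vals, hch, hvl⟩ := Hc g (by omega)
          obtain ⟨g', rfl⟩ : ∃ g', g = g' + 1 := ⟨g - 1, by omega⟩
          exact ⟨v :: vals, by simp [aChildren, hv, hch], by simp [hvl]⟩

-- one-step unfolding lemmas for the mutual stack machine (simp on bOuter/bInner loops)
lemma bOuter_step (f : Nat) (stack : List (Nat × Int × Int × List Int)) (c m : Int)
    (rest : List Int) :
    bOuter (f + 1) stack (c :: m :: rest) = bInner f ((c.toNat, c, m, ([] : List Int)) :: stack) rest := by
  rw [bOuter]

lemma bInner_zero (f : Nat) (qc qm : Int) (vals : List Int)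
    (s : List (Nat × Int × Int × List Int)) (ns : List Int) :
    bInner f ((0, qc, qm, vals) :: s) ns
      = match readMetaB qc vals 0 qm.toNat ns with
        | some (total, rest) =>
          (match s with
          | [] => some total
          | (r2, qc2, qm2, v2) :: s2 => bInner f ((r2 - 1, qc2, qm2, v2 ++ [total]) :: s2) rest)
        | none => none := by
  rw [bInner]; simp

lemma bInner_pos (f rem : Nat) (h : rem ≠ 0) (qc qm : Int) (vals : List Int)
    (s : List (Nat × Int × Int × List Int)) (ns : List Int) :
    bInner f ((rem, qc, qm, vals) :: s) ns = bOuter f ((rem, qc, qm, vals) :: s) ns := by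
  rw [bInner]; simp [h]

-- the simulation: whenever A's recursion computes (v, rest) from ns, B's stack machine,
-- run on ns with any stack, reaches the continuation `resume` with value v and remainder rest,
-- spending exactly d fuel (one unit per node, so 2*d is at most the consumed length)
lemma sim :
    ∀ f : Nat,
      (∀ ns v rest, aRun f ns = some (v, rest) →
        ∃ d, 1 ≤ d ∧ 2 * d + rest.length ≤ ns.length ∧
          ∀ fb stack, bOuter (fb + d) stack ns = resume fb stack v rest) ∧
      (∀ (k : Nat) (ns : List Int) (vals rest : List Int),
        aChildren f k ns = some (vals, rest) →
        ∃ d, 2 * d + rest.length ≤ ns.length ∧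
          ∀ fb qc qm v0 stack,
            bInner (fb + d) ((k, qc, qm, v0) :: stack) ns
              = bInner fb ((0, qc, qm, v0 ++ vals) :: stack) rest) := by
  intro f
  induction f with
  | zero =>
    constructor
    · intro ns v rest h; simp [aRun] at h
    · intro k ns vals rest h
      cases k with
      | zero =>
        simp [aChildren] at h
        exact ⟨0, by simp [h.2], by intro fb qc qm v0 stack; simp [h.1, h.2]⟩
      | succ k => simp [aChildren, aRun] at h
  | succ f ih =>
    have hA : ∀ ns v rest, aRun (f + 1) ns = some (v, rest) →
        ∃ d, 1 ≤ d ∧ 2 * d + rest.length ≤ ns.length ∧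
          ∀ fb stack, bOuter (fb + d) stack ns = resume fb stack v rest := by
      intro ns v rest h
      match ns with
      | [] => simp [aRun] at h
      | [_] => simp [aRun] at h
      | c :: m :: rest0 =>
        by_cases hc0 : c = 0
        · subst hc0
          simp only [aRun, if_pos] at h
          refine ⟨1, le_refl 1, by have := sumMetaA_len _ _ _ _ _ h; simp; omega, ?_⟩
          intro fb stack
          show bOuter (fb + 1) stack (0 :: m :: rest0) = resume fb stack v rest
          rw [bOuter_step fb stack 0 m rest0]
          rw [show ((0:Int).toNat) = 0 from rfl]
          rw [bInner_zero fb 0 m [] stack rest0]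
          rw [readMetaB_zero, h]
          cases stack with
          | nil => simp [resume]
          | cons fr s2 => obtain ⟨r2, qc2, qm2, v2⟩ := fr; simp [resume]
        · simp only [aRun, if_neg hc0] at h
          cases hch : aChildren f c.toNat rest0 with
          | none => rw [hch] at h; simp at h
          | some p =>
            obtain ⟨vals, rest1⟩ := p
            rw [hch] at h; simp at h
            obtain ⟨dC, hlen, hsim⟩ := ih.2 _ _ _ _ hch
            refine ⟨dC + 1, by omega,
              by have := metaIdxA_len c vals _ _ _ _ _ h; simp; omega, ?_⟩
            intro fb stack
            show bOuter (fb + (dC + 1)) stack (c :: m :: rest0) = resume fb stack v rest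
            rw [show fb + (dC + 1) = (fb + dC) + 1 from by omega]
            rw [bOuter_step (fb + dC) stack c m rest0]
            rw [hsim fb c m [] stack]
            rw [show ([] : List Int) ++ vals = vals from rfl]
            rw [bInner_zero fb c m vals stack rest1]
            rw [readMetaB_ne c hc0, h]
            cases stack with
            | nil => simp [resume]
            | cons fr s2 => obtain ⟨r2, qc2, qm2, v2⟩ := fr; simp [resume]
    refine ⟨hA, ?_⟩
    intro k
    induction k with
    | zero =>
      intro ns vals rest h
      simp [aChildren] at h
      exact ⟨0, by simp [h.2], by intro fb qc qm v0 stack; simp [h.1, h.2]⟩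
    | succ k ihk =>
      intro ns vals rest h
      simp only [aChildren] at h
      cases hr : aRun (f + 1) ns with
      | none => rw [hr] at h; simp at h
      | some p =>
        obtain ⟨v1, r1⟩ := p
        rw [hr] at h; simp at h
        cases hcs : aChildren (f + 1) k r1 with
        | none => rw [hcs] at h; simp at h
        | some q =>
          obtain ⟨vals', rest'⟩ := q
          rw [hcs] at h; simp at h
          obtain ⟨hvals, hrest⟩ := h
          subst hvals; subst hrest
          obtain ⟨d1, hd1, hl1, hs1⟩ := hA _ _ _ hr
          obtain ⟨dk, hlk, hsk⟩ := ihk _ _ _ hcs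
          refine ⟨d1 + dk, by omega, ?_⟩
          intro fb qc qm v0 stack
          rw [show fb + (d1 + dk) = (fb + dk) + d1 from by omega]
          rw [bInner_pos ((fb + dk) + d1) (k + 1) (Nat.succ_ne_zero k) qc qm v0 stack ns]
          rw [hs1 (fb + dk) ((k + 1, qc, qm, v0) :: stack)]
          rw [show resume (fb + dk) ((k + 1, qc, qm, v0) :: stack) v1 r1
              = bInner (fb + dk) ((k + 1 - 1, qc, qm, v0 ++ [v1]) :: stack) r1 from rfl]
          rw [show k + 1 - 1 = k from rfl]
          rw [hsk fb qc qm (v0 ++ [v1]) stack]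
          simp

-- ===== VERDICT (by name: the statement is the Claim_ definition above) =====
theorem node_value_spec : Claim_equal_node_value := by
  intro numbers _ hpre
  unfold Spec_node_value
  unfold Pre_node_value at hpre
  rw [Option.isSome_iff_exists] at hpre
  obtain ⟨rest, hsh⟩ := hpre
  obtain ⟨hlen, H⟩ := (shape_aRun (2 * numbers.length + 2)).1 _ _ hsh
  obtain ⟨v, hA⟩ := H (numbers.length + 1) (by omega)
  obtain ⟨d, hd1, hd2, hsim⟩ := (sim (numbers.length + 1)).1 _ _ _ hA
  have hfit : numbers.length + 1 = (numbers.length + 1 - d) + d := by omega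
  unfold node_value node_value_alt
  rw [hA, hfit, hsim (numbers.length + 1 - d) []]
  simp [resume]
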